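-- pv_equiv track=rewrite | github.com/yang4978/-OJ | Python/1900. 【认证试题】字符排序.py | character_sort
-- ===== SOURCE A (Python) =====
-- def character_sort(input_str):
--     # 在此添加你的代码
--     arr = [[] for _ in range(3)]
--     index = []
--
--     for c in input_str:
--         if c.isdigit():
--             index.append(0)
--         elif c.islower():
--             index.append(1)
--         else:
--             index.append(2)
--         arr[index[-1]].append(c)
--
--
--     for x in arr:
--         x.sort(reverse = True)
--
--     arr[1] = arr[2] + arr[1]
--
--     return [arr[min(1,n)].pop() for n in index]
-- ===== SOURCE B (Python) =====
-- def character_sort(input_str):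
--     # counting sort over the fixed ASCII alphabet, then one pass dispatching
--     # each position to its category queue
--     cnt = [0] * 128
--     for c in input_str:
--         cnt[ord(c)] += 1
--     digit_q = [chr(i) for i in range(48, 58) for _ in range(cnt[i])]
--     lower_q = [chr(i) for i in range(97, 123) for _ in range(cnt[i])]
--     other_q = [chr(i) for i in range(128)
--                if not (48 <= i < 58) and not (97 <= i < 123)
--                for _ in range(cnt[i])]
--     nondigit_q = lower_q + other_q
--     it_d = iter(digit_q)
--     it_n = iter(nondigit_q)
--     return [next(it_d) if c.isdigit() else next(it_n) for c in input_str]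
-- ===== Notes on version B (the rewrite author's own statement) =====
-- stated objective: faster
-- what changed: Replaces the three comparison sorts (sorted with reverse=True) and the pop-per-position replay with a single counting pass over a fixed 128-slot ASCII table, from which the per-category queues are reconstructed in order and dispensed front-to-back in one final pass.
import Mathlib
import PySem

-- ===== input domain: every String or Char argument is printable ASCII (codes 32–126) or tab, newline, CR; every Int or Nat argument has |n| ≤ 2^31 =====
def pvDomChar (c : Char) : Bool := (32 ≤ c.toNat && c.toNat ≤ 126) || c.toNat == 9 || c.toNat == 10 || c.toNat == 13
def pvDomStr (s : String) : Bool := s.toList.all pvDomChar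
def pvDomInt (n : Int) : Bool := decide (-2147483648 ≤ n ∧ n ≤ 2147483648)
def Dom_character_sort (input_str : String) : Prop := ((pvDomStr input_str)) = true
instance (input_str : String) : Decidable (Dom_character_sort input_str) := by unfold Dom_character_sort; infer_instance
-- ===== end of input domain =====

-- B replaces A's three comparison sorts + pop-per-position replay by one counting pass over a
-- fixed 128-slot ASCII table and a single dispatch pass (objective: faster, O(n log n) → O(n)).

-- ===== PORT A =====
-- the category/append loop body of A's first `for c in input_str`
def csStepA (st : (List Char × List Char × List Char) × List Nat) (c : Char) :
    (List Char × List Char × List Char) × List Nat :=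
  let n : Nat := if PySem.Chars.isdigit c then 0 else if PySem.Chars.islower c then 1 else 2
  let index := st.2 ++ [n]
  let arr :=
    if n = 0 then (st.1.1 ++ [c], st.1.2.1, st.1.2.2)
    else if n = 1 then (st.1.1, st.1.2.1 ++ [c], st.1.2.2)
    else (st.1.1, st.1.2.1, st.1.2.2 ++ [c])
  (arr, index)

-- A's final comprehension `[arr[min(1,n)].pop() for n in index]`: pops mutate arr[0] / arr[1];
-- the `none` branches are where Python's list.pop() would raise IndexError (never reached:
-- the pops match the counts by construction)
def csPopLoop : List Nat → List Char → List Char → List String × List Char × List Char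
  | [], a0, a1 => ([], a0, a1)
  | n :: rest, a0, a1 =>
    if Min.min 1 n = 0 then
      match PySem.List.pop? a0 with
      | some (c, a0') =>
        let r := csPopLoop rest a0' a1
        (String.mk [c] :: r.1, r.2)
      | none => ([], a0, a1)
    else
      match PySem.List.pop? a1 with
      | some (c, a1') =>
        let r := csPopLoop rest a0 a1'
        (String.mk [c] :: r.1, r.2)
      | none => ([], a0, a1)

def character_sort (input_str : String) : List String :=
  let st := input_str.toList.foldl csStepA (([], [], []), [])
  let a0 := PySem.List.sorted st.1.1 (fun x => x) true
  let a1 := PySem.List.sorted st.1.2.1 (fun x => x) true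
  let a2 := PySem.List.sorted st.1.2.2 (fun x => x) true
  (csPopLoop st.2 a0 (a2 ++ a1)).1

-- ===== PORT B =====
-- `cnt = [0]*128; for c in input_str: cnt[ord(c)] += 1`
def csCount (s : List Char) : List Nat :=
  s.foldl (fun cnt c => cnt.set c.toNat (cnt.getD c.toNat 0 + 1)) (List.replicate 128 0)

-- `[chr(i) for i in I for _ in range(cnt[i])]`
def csQueue (cnt : List Nat) (I : List Nat) : List Char :=
  I.flatMap (fun i => List.replicate (cnt.getD i 0) (Char.ofNat i))

-- the final comprehension consuming the two iterators; `[]` = exhausted iterator (never reached)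
def csTakeLoop : List Char → List Char → List Char → List String
  | [], _, _ => []
  | c :: rest, dq, nq =>
    if PySem.Chars.isdigit c then
      match dq with
      | d :: dq' => String.mk [d] :: csTakeLoop rest dq' nq
      | [] => []
    else
      match nq with
      | m :: nq' => String.mk [m] :: csTakeLoop rest dq nq'
      | [] => []

def character_sort_alt (input_str : String) : List String :=
  let s := input_str.toList
  let cnt := csCount s
  let digit_q := csQueue cnt (List.range' 48 10)       -- range(48, 58)
  let lower_q := csQueue cnt (List.range' 97 26)       -- range(97, 123)
  let other_q := csQueue cnt ((List.range 128).filter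
      (fun i => !(decide (48 ≤ i) && decide (i < 58)) && !(decide (97 ≤ i) && decide (i < 123))))
  csTakeLoop s digit_q (lower_q ++ other_q)

-- ===== PRECONDITION & SPEC =====
def Spec_character_sort (input_str : String) (out : List String) : Prop := out = character_sort_alt input_str
instance (input_str : String) (out : List String) : Decidable (Spec_character_sort input_str out) := by unfold Spec_character_sort; infer_instance

-- ===== CLAIM (what is proved, stated in full; the proofs are below) =====
def Claim_equal_character_sort : Prop := ∀ (input_str : String), Dom_character_sort input_str → Spec_character_sort input_str (character_sort input_str)

-- ===== LEMMAS AND PROOFS =====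

theorem cs_isdigit_iff (c : Char) : PySem.Chars.isdigit c = true ↔ 48 ≤ c.toNat ∧ c.toNat < 58 := by
  unfold PySem.Chars.isdigit
  simp only [Bool.and_eq_true, decide_eq_true_eq, Char.le_def, UInt32.le_iff_toNat_le]
  show 48 ≤ c.toNat ∧ c.toNat ≤ 57 ↔ _
  omega

theorem cs_islower_iff (c : Char) : PySem.Chars.islower c = true ↔ 97 ≤ c.toNat ∧ c.toNat < 123 := by
  unfold PySem.Chars.islower
  simp only [Bool.and_eq_true, decide_eq_true_eq, Char.le_def, UInt32.le_iff_toNat_le]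
  show 97 ≤ c.toNat ∧ c.toNat ≤ 122 ↔ _
  omega

theorem cs_toNat_ofNat (i : Nat) (h : i < 128) : (Char.ofNat i).toNat = i := by
  rw [Char.toNat_ofNat, if_pos (Or.inl (by omega))]

theorem cs_ofNat_eq_iff (i : Nat) (h : i < 128) (a : Char) : Char.ofNat i = a ↔ i = a.toNat := by
  constructor
  · intro he; rw [← he, cs_toNat_ofNat i h]
  · intro he; rw [he, Char.ofNat_toNat]

theorem cs_ofNat_le (i j : Nat) (hi : i < 128) (hj : j < 128) (h : i ≤ j) :
    Char.ofNat i ≤ Char.ofNat j := by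
  rw [Char.le_def, UInt32.le_iff_toNat_le]
  show (Char.ofNat i).toNat ≤ (Char.ofNat j).toNat
  rw [cs_toNat_ofNat i hi, cs_toNat_ofNat j hj]; exact h

-- the counting pass computes per-character occurrence counts
theorem cs_count_fold (s : List Char) : ∀ (cnt : List Nat),
    (∀ c ∈ s, c.toNat < cnt.length) → ∀ i, i < cnt.length →
    (s.foldl (fun cnt c => cnt.set c.toNat (cnt.getD c.toNat 0 + 1)) cnt).getD i 0
      = cnt.getD i 0 + s.countP (fun c => c.toNat == i) := by
  induction s with
  | nil => intro cnt _ i _; simp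
  | cons c s ih =>
    intro cnt hs i hi
    rw [List.foldl_cons]
    have hc : c.toNat < cnt.length := hs c (List.mem_cons_self)
    have hlen : (cnt.set c.toNat (cnt.getD c.toNat 0 + 1)).length = cnt.length := List.length_set
    rw [ih _ (by intro d hd; rw [hlen]; exact hs d (List.mem_cons_of_mem _ hd)) i (by omega)]
    rw [List.countP_cons]
    by_cases he : c.toNat = i
    · have h1 : (cnt.set c.toNat (cnt.getD c.toNat 0 + 1)).getD i 0 = cnt.getD c.toNat 0 + 1 := by
        rw [List.getD_eq_getElem?_getD, ← he, List.getElem?_set_self hc, Option.getD_some]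
      rw [h1, if_pos (by simp [he]), he]
      omega
    · have h1 : (cnt.set c.toNat (cnt.getD c.toNat 0 + 1)).getD i 0 = cnt.getD i 0 := by
        rw [List.getD_eq_getElem?_getD, List.getElem?_set_ne he, ← List.getD_eq_getElem?_getD]
      rw [h1, if_neg (by simp [he])]
      omega

theorem cs_csCount_getD (s : List Char) (hs : ∀ c ∈ s, c.toNat < 128) (i : Nat) (hi : i < 128) :
    (csCount s).getD i 0 = s.countP (fun c => c.toNat == i) := by
  unfold csCount
  rw [cs_count_fold s (List.replicate 128 0) (by simpa using hs) i (by simpa using hi)]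
  have h0 : (List.replicate 128 (0 : Nat)).getD i 0 = 0 := by
    rw [List.getD_eq_getElem?_getD, List.getElem?_replicate, if_pos hi]; rfl
  rw [h0, Nat.zero_add]

-- count of an arbitrary character in a replicate-flatMap queue
theorem cs_count_flatMap (k : Nat → Nat) (I : List Nat) (hnd : I.Nodup)
    (h128 : ∀ i ∈ I, i < 128) (a : Char) :
    (I.flatMap (fun i => List.replicate (k i) (Char.ofNat i))).count a
      = if a.toNat ∈ I then k a.toNat else 0 := by
  induction I with
  | nil => simp
  | cons i I ih =>
    rw [List.flatMap_cons, List.count_append, List.count_replicate]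
    have hi : i < 128 := h128 i (List.mem_cons_self)
    rw [ih (List.nodup_cons.mp hnd).2 (fun j hj => h128 j (List.mem_cons_of_mem _ hj))]
    by_cases he : i = a.toNat
    · have hb : (Char.ofNat i == a) = true := by
        rw [beq_iff_eq, cs_ofNat_eq_iff i hi]; exact he
      have hni : a.toNat ∉ I := by rw [← he]; exact (List.nodup_cons.mp hnd).1
      simp [hb, he, hni]
    · have hb : ¬(Char.ofNat i = a) := by
        rw [cs_ofNat_eq_iff i hi]; exact he
      have he' : ¬(a.toNat = i) := fun h => he h.symm
      by_cases hm : a.toNat ∈ I <;> simp [hb, he', hm, List.mem_cons]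

theorem cs_pairwise_flatMap (k : Nat → Nat) (I : List Nat)
    (hp : I.Pairwise (fun i j => Char.ofNat i ≤ Char.ofNat j)) :
    (I.flatMap (fun i => List.replicate (k i) (Char.ofNat i))).Pairwise (· ≤ ·) := by
  induction I with
  | nil => simp
  | cons i I ih =>
    rw [List.flatMap_cons, List.pairwise_append]
    obtain ⟨hhead, htail⟩ := List.pairwise_cons.mp hp
    refine ⟨List.pairwise_replicate.mpr (Or.inr le_rfl), ih htail, ?_⟩
    intro x hx y hy
    obtain ⟨_, hx⟩ := List.mem_replicate.mp hx
    obtain ⟨j, hj, hyr⟩ := List.mem_flatMap.mp hy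
    obtain ⟨_, hy⟩ := List.mem_replicate.mp hyr
    rw [hx, hy]; exact hhead j hj

-- any ≤-ordered rearrangement of l IS (sorted(l, reverse=True)).reverse
theorem cs_eq_sortedAsc (l q : List Char) (hperm : q.Perm l)
    (hpw : q.Pairwise (fun a b : Char => a ≤ b)) :
    q = (PySem.List.sorted l (fun x => x) true).reverse := by
  refine List.Perm.eq_of_pairwise (fun a b _ _ h1 h2 => le_antisymm h1 h2) hpw ?_ ?_
  · rw [List.pairwise_reverse]
    exact PySem.List.sorted_pairwise_rev l (fun x => x)
  · have h1 : (PySem.List.sorted l (fun x => x) true).reverse.Perm l :=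
      (List.reverse_perm _).trans (PySem.List.sorted_perm l (fun x => x) true)
    exact hperm.trans h1.symm

-- the master lemma: a counting queue over index set I equals the ascending run of s.filter p
theorem cs_queue_eq (s : List Char) (hs : ∀ c ∈ s, c.toNat < 128) (p : Char → Bool)
    (I : List Nat) (hnd : I.Nodup) (h128 : ∀ i ∈ I, i < 128)
    (hpI : ∀ i ∈ I, p (Char.ofNat i) = true)
    (hIp : ∀ c ∈ s, p c = true → c.toNat ∈ I)
    (hpw : I.Pairwise (fun i j => Char.ofNat i ≤ Char.ofNat j)) :
    csQueue (csCount s) I = (PySem.List.sorted (s.filter p) (fun x => x) true).reverse := by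
  unfold csQueue
  have hq : I.flatMap (fun i => List.replicate ((csCount s).getD i 0) (Char.ofNat i))
      = I.flatMap (fun i => List.replicate (s.countP (fun c => c.toNat == i)) (Char.ofNat i)) :=
    List.flatMap_congr (fun i hi => by rw [cs_csCount_getD s hs i (h128 i hi)])
  rw [hq]
  apply cs_eq_sortedAsc
  · rw [List.perm_iff_count]
    intro a
    rw [cs_count_flatMap _ I hnd h128 a]
    have hcp : s.countP (fun c => c.toNat == a.toNat) = s.count a := by
      unfold List.count
      apply List.countP_congr
      intro c _
      constructor
      · intro h
        have : c.toNat = a.toNat := by simpa using h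
        have : Char.ofNat c.toNat = Char.ofNat a.toNat := by rw [this]
        rw [Char.ofNat_toNat, Char.ofNat_toNat] at this
        simp [this]
      · intro h
        have : c = a := by simpa using h
        simp [this]
    by_cases hm : a.toNat ∈ I
    · have hpa : p a = true := by
        have := hpI a.toNat hm
        rwa [Char.ofNat_toNat] at this
      rw [if_pos hm, hcp, List.count_filter hpa]
    · rw [if_neg hm]
      by_cases has : a ∈ s
      · have hpa : p a = false := by
          by_contra h
          exact hm (hIp a has (by revert h; cases p a <;> simp))
        symm; rw [List.count_eq_zero]
        intro hmem
        have := List.mem_filter.mp hmem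
        rw [hpa] at this; exact absurd this.2 (by simp)
      · symm; rw [List.count_eq_zero]
        intro hmem
        exact has (List.mem_filter.mp hmem).1
  · exact cs_pairwise_flatMap _ I hpw

-- A's first loop in closed form: the three category buckets and the index pattern
def csCat (c : Char) : Nat :=
  if PySem.Chars.isdigit c then 0 else if PySem.Chars.islower c then 1 else 2

theorem cs_foldA (s : List Char) : ∀ st : (List Char × List Char × List Char) × List Nat,
    s.foldl csStepA st
      = ((st.1.1 ++ s.filter (fun c => PySem.Chars.isdigit c),
          st.1.2.1 ++ s.filter (fun c => !PySem.Chars.isdigit c && PySem.Chars.islower c),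
          st.1.2.2 ++ s.filter (fun c => !PySem.Chars.isdigit c && !PySem.Chars.islower c)),
         st.2 ++ s.map csCat) := by
  induction s with
  | nil => intro st; simp
  | cons c s ih =>
    intro st
    rw [List.foldl_cons, ih]
    by_cases hd : PySem.Chars.isdigit c
    · simp [csStepA, csCat, hd, List.filter_cons]
    · by_cases hl : PySem.Chars.islower c
      · simp [csStepA, csCat, hd, hl, List.filter_cons]
      · simp [csStepA, csCat, hd, hl, List.filter_cons]

-- popping from the tails of a0 / a1 along the category pattern = consuming the reversed
-- lists from the front along the string itself
theorem csPopLoop_zero (rest : List Nat) (a0 a1 : List Char) (y : Char) :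
    (csPopLoop (0 :: rest) (a0 ++ [y]) a1).1 = String.mk [y] :: (csPopLoop rest a0 a1).1 := by
  have hmin : Min.min 1 0 = 0 := by decide
  simp [csPopLoop, hmin, PySem.List.pop?_last]

theorem csPopLoop_zero_nil (rest : List Nat) (a1 : List Char) :
    (csPopLoop (0 :: rest) [] a1).1 = [] := by
  have hmin : Min.min 1 0 = 0 := by decide
  have hp : PySem.List.pop? ([] : List Char) = none := rfl
  simp [csPopLoop, hmin, hp]

theorem csPopLoop_pos (n : Nat) (hn : ¬(Min.min 1 n = 0)) (rest : List Nat)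
    (a0 a1 : List Char) (y : Char) :
    (csPopLoop (n :: rest) a0 (a1 ++ [y])).1 = String.mk [y] :: (csPopLoop rest a0 a1).1 := by
  simp [csPopLoop, hn, PySem.List.pop?_last]

theorem csPopLoop_pos_nil (n : Nat) (hn : ¬(Min.min 1 n = 0)) (rest : List Nat)
    (a0 : List Char) :
    (csPopLoop (n :: rest) a0 []).1 = [] := by
  have hp : PySem.List.pop? ([] : List Char) = none := rfl
  simp [csPopLoop, hn, hp]

theorem cs_loopEq (s : List Char) : ∀ a0 a1 : List Char,
    (csPopLoop (s.map csCat) a0 a1).1 = csTakeLoop s a0.reverse a1.reverse := by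
  induction s with
  | nil => intro a0 a1; rfl
  | cons c s ih =>
    intro a0 a1
    rw [List.map_cons]
    by_cases hd : PySem.Chars.isdigit c
    · have hc : csCat c = 0 := by simp [csCat, hd]
      rw [hc]
      cases h : a0.reverse with
      | nil =>
        have ha0 : a0 = [] := by simpa using congrArg List.reverse h
        subst ha0
        rw [csPopLoop_zero_nil]
        simp [csTakeLoop, hd]
      | cons y ys =>
        have ha0 : a0 = ys.reverse ++ [y] := List.reverse_eq_cons_iff.mp h
        rw [ha0, csPopLoop_zero, ih, List.reverse_reverse]
        simp [csTakeLoop, hd]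
    · have hc : ¬(Min.min 1 (csCat c) = 0) := by
        simp only [csCat, if_neg hd]
        by_cases hl : PySem.Chars.islower c <;> simp [hl]
      cases h : a1.reverse with
      | nil =>
        have ha1 : a1 = [] := by simpa using congrArg List.reverse h
        subst ha1
        rw [csPopLoop_pos_nil _ hc]
        simp [csTakeLoop, hd]
      | cons y ys =>
        have ha1 : a1 = ys.reverse ++ [y] := List.reverse_eq_cons_iff.mp h
        rw [ha1, csPopLoop_pos _ hc, ih, List.reverse_reverse]
        simp [csTakeLoop, hd]

-- ===== VERDICT (by name: the statement is the Claim_ definition above) =====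
theorem character_sort_spec : Claim_equal_character_sort := by
  intro input_str hdom
  unfold Spec_character_sort
  set s := input_str.toList with hsdef
  have hs : ∀ c ∈ s, c.toNat < 128 := by
    intro c hc
    have := List.all_eq_true.mp hdom c hc
    simp only [pvDomChar, Bool.or_eq_true, Bool.and_eq_true, decide_eq_true_eq, beq_iff_eq] at this
    omega
  -- closed form of A
  show character_sort input_str = character_sort_alt input_str
  unfold character_sort character_sort_alt
  rw [← hsdef, cs_foldA s (([], [], []), [])]
  simp only [List.nil_append]
  rw [cs_loopEq s, List.reverse_append]
  -- digit queue
  have hdq : csQueue (csCount s) (List.range' 48 10)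
      = (PySem.List.sorted (s.filter (fun c => PySem.Chars.isdigit c)) (fun x => x) true).reverse := by
    apply cs_queue_eq s hs _ _ (List.nodup_range' 1)
    · intro i hi; have := List.mem_range'_1.mp hi; omega
    · intro i hi
      have hi' := List.mem_range'_1.mp hi
      rw [cs_isdigit_iff, cs_toNat_ofNat i (by omega)]; omega
    · intro c _ hp
      rw [List.mem_range'_1]
      have := (cs_isdigit_iff c).mp hp; omega
    · exact (List.pairwise_lt_range' 1).imp_of_mem (fun {i j} hi hj hlt =>
        cs_ofNat_le i j (by have := List.mem_range'_1.mp hi; omega)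
          (by have := List.mem_range'_1.mp hj; omega) (Nat.le_of_lt hlt))
  -- lower queue
  have hlq : csQueue (csCount s) (List.range' 97 26)
      = (PySem.List.sorted (s.filter (fun c => !PySem.Chars.isdigit c && PySem.Chars.islower c))
          (fun x => x) true).reverse := by
    have hfc : s.filter (fun c => !PySem.Chars.isdigit c && PySem.Chars.islower c)
        = s.filter (fun c => PySem.Chars.islower c) := by
      apply List.filter_congr
      intro c _
      by_cases hl : PySem.Chars.islower c
      · have hd : PySem.Chars.isdigit c = false := by
          by_contra h
          have h1 := (cs_isdigit_iff c).mp (by revert h; cases PySem.Chars.isdigit c <;> simp)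
          have h2 := (cs_islower_iff c).mp hl
          omega
        simp [hl, hd]
      · simp [hl]
    rw [hfc]
    apply cs_queue_eq s hs _ _ (List.nodup_range' 1)
    · intro i hi; have := List.mem_range'_1.mp hi; omega
    · intro i hi
      have hi' := List.mem_range'_1.mp hi
      rw [cs_islower_iff, cs_toNat_ofNat i (by omega)]; omega
    · intro c _ hp
      rw [List.mem_range'_1]
      have := (cs_islower_iff c).mp hp; omega
    · exact (List.pairwise_lt_range' 1).imp_of_mem (fun {i j} hi hj hlt =>
        cs_ofNat_le i j (by have := List.mem_range'_1.mp hi; omega)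
          (by have := List.mem_range'_1.mp hj; omega) (Nat.le_of_lt hlt))
  -- other queue
  have hoq : csQueue (csCount s) ((List.range 128).filter
        (fun i => !(decide (48 ≤ i) && decide (i < 58)) && !(decide (97 ≤ i) && decide (i < 123))))
      = (PySem.List.sorted (s.filter (fun c => !PySem.Chars.isdigit c && !PySem.Chars.islower c))
          (fun x => x) true).reverse := by
    apply cs_queue_eq s hs _ _ (List.Nodup.filter _ (List.nodup_range))
    · intro i hi
      exact List.mem_range.mp (List.mem_filter.mp hi).1
    · intro i hi
      obtain ⟨him, hcond⟩ := List.mem_filter.mp hi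
      have hi128 : i < 128 := List.mem_range.mp him
      simp only [Bool.and_eq_true, Bool.not_eq_true', Bool.and_eq_false_iff,
        decide_eq_false_iff_not, Bool.not_eq_true] at hcond ⊢
      constructor
      · cases hb : PySem.Chars.isdigit (Char.ofNat i) with
        | false => rfl
        | true =>
          have := (cs_isdigit_iff _).mp hb
          rw [cs_toNat_ofNat i hi128] at this
          rcases hcond.1 with h' | h' <;> omega
      · cases hb : PySem.Chars.islower (Char.ofNat i) with
        | false => rfl
        | true =>
          have := (cs_islower_iff _).mp hb
          rw [cs_toNat_ofNat i hi128] at this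
          rcases hcond.2 with h' | h' <;> omega
    · intro c hc hp
      rw [List.mem_filter]
      refine ⟨List.mem_range.mpr (hs c hc), ?_⟩
      simp only [Bool.and_eq_true, Bool.not_eq_true'] at hp
      have hd : ¬(48 ≤ c.toNat ∧ c.toNat < 58) := fun h =>
        by rw [(cs_isdigit_iff c).mpr h] at hp; exact absurd hp.1 (by simp)
      have hl : ¬(97 ≤ c.toNat ∧ c.toNat < 123) := fun h =>
        by rw [(cs_islower_iff c).mpr h] at hp; exact absurd hp.2 (by simp)
      simp only [Bool.and_eq_true, Bool.not_eq_true', Bool.and_eq_false_iff,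
        decide_eq_false_iff_not]
      constructor
      · by_cases h1 : 48 ≤ c.toNat
        · right; intro h2; exact hd ⟨h1, h2⟩
        · left; exact h1
      · by_cases h1 : 97 ≤ c.toNat
        · right; intro h2; exact hl ⟨h1, h2⟩
        · left; exact h1
    · exact (List.Pairwise.sublist List.filter_sublist List.pairwise_lt_range).imp_of_mem
        (fun {i j} hi hj hlt =>
          cs_ofNat_le i j (List.mem_range.mp (List.mem_filter.mp hi).1)
            (List.mem_range.mp (List.mem_filter.mp hj).1) (Nat.le_of_lt hlt))
  rw [hdq, hlq, hoq]
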